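-- pv_equiv track=rewrite | github.com/woowonjin/Code_Study | WONJIN/Week3/develop_func.py | solution
-- ===== SOURCE A (Python) =====
-- import math
--
-- def solution(progresses, speeds):
--     answer = []
--     days = [math.ceil((100-progresses[i])/speeds[i]) for i in range(len(progresses))]
--     target_idx = 0
--     cnt = 1
--     for idx, day in enumerate(days):
--         if idx == 0:
--             continue
--         if day <= days[target_idx]:
--             cnt += 1
--         else:
--             answer.append(cnt)
--             target_idx = idx
--             cnt = 1
--     answer.append(cnt)
--     return answer
-- ===== SOURCE B (Python) =====
-- import math
--
-- def solution(progresses, speeds):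
--     days = [math.ceil((100 - progresses[i]) / speeds[i]) for i in range(len(progresses))]
--     # pass 1: running maximum of days (the day the batch containing each task ships)
--     rmax = []
--     m = None
--     for d in days:
--         if m is None or d > m:
--             m = d
--         rmax.append(m)
--     # pass 2: run-length encode rmax; each maximal run of equal running-max values is one batch
--     answer = []
--     prev = None
--     for v in rmax:
--         if v == prev:
--             answer[-1] += 1
--         else:
--             answer.append(1)
--             prev = v
--     return answer
-- ===== Notes on version B (the rewrite author's own statement) =====
-- stated objective: alternative
-- what changed: Replaced A's single stateful loop (leader index target_idx plus counter, comparing each day against the group leader) by two staged passes over a derived table: first build the running-maximum list rmax of days, then run-length encode rmax by equality -- each maximal run of equal running-max values is one deployment batch.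
-- outside the precondition, e.g. on solution([], []): A returns [1], B returns []
import Mathlib
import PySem

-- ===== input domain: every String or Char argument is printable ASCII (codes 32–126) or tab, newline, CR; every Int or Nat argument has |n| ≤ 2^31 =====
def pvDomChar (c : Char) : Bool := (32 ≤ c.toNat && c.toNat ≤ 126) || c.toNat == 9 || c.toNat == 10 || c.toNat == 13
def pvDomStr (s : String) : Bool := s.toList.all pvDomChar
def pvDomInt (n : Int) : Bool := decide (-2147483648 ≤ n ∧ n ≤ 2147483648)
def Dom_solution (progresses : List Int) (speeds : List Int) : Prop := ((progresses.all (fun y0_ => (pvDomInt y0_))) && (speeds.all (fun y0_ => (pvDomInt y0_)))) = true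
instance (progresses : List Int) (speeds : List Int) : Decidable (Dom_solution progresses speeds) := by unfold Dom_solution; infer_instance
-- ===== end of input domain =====

-- B replaces A's stateful leader/counter loop by two staged passes: a running-maximum table of the
-- days list, then a run-length encoding of that table; equal return values on all of Pre_.

-- ===== PORT A =====
-- math.ceil((100-p)/s) ported as integer ceiling -((-(100-p)) // s): exact on Dom, where both
-- operands fit a double so the float quotient's ceiling equals the exact rational ceiling.
def mkDays (progresses : List Int) (speeds : List Int) : List Int :=
  (List.range progresses.length).map (fun i =>
    -(PySem.Int.floordiv (-(100 - PySem.List.pyGetD progresses (i : Int) 0))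
        (PySem.List.pyGetD speeds (i : Int) 0)))

-- the body of A's for-loop
def stepA (days : List Int) (st : List Int × Int × Int) (p : Int × Int) : List Int × Int × Int :=
  if p.1 = 0 then st
  else if p.2 ≤ PySem.List.pyGetD days st.2.1 0 then (st.1, st.2.1, st.2.2 + 1)
  else (st.1 ++ [st.2.2], p.1, 1)

def solution (progresses : List Int) (speeds : List Int) : List Int :=
  let days := mkDays progresses speeds
  let st := (PySem.List.enumerate days 0).foldl (stepA days) ([], 0, 1)
  st.1 ++ [st.2.2]

-- ===== PORT B =====
-- pass 1 body: `if m is None or d > m: m = d` then `rmax.append(m)`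
def stepMax (st : List Int × Option Int) (d : Int) : List Int × Option Int :=
  let m : Int := match st.2 with
    | none => d
    | some m0 => if d > m0 then d else m0
  (st.1 ++ [m], some m)

-- pass 2 body: `if v == prev: answer[-1] += 1 else: answer.append(1); prev = v`
def stepRle (st : List Int × Option Int) (v : Int) : List Int × Option Int :=
  match st.2 with
  | some p =>
    if v = p then (st.1.dropLast ++ [st.1.getLastD 0 + 1], st.2)
    else (st.1 ++ [1], some v)
  | none => (st.1 ++ [1], some v)

def solution_alt (progresses : List Int) (speeds : List Int) : List Int :=
  let days := mkDays progresses speeds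
  let rmax := (days.foldl stepMax ([], none)).1
  (rmax.foldl stepRle ([], none)).1

-- ===== PRECONDITION & SPEC =====
-- Pre_ excludes the inputs where A raises (speeds shorter than progresses: IndexError; a zero speed
-- at a used index: ZeroDivisionError) and the empty progresses list, which lies outside the problem's
-- natural domain (the task batches at least one deployment) and on which A's unconditional trailing
-- append returns [1] while B returns [].
def Pre_solution (progresses : List Int) (speeds : List Int) : Prop :=
  progresses ≠ [] ∧ progresses.length ≤ speeds.length ∧ (0 : Int) ∉ speeds.take progresses.length
instance (progresses : List Int) (speeds : List Int) : Decidable (Pre_solution progresses speeds) := by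
  unfold Pre_solution; infer_instance
def pvWitness_solution : List Int × List Int := ([30, 55, 95], [5, 10, 60])

def Spec_solution (progresses : List Int) (speeds : List Int) (out : List Int) : Prop :=
  out = solution_alt progresses speeds
instance (progresses : List Int) (speeds : List Int) (out : List Int) : Decidable (Spec_solution progresses speeds out) := by
  unfold Spec_solution; infer_instance

-- ===== CLAIM (what is proved, stated in full; the proofs are below) =====
def Claim_equal_solution : Prop := ∀ (progresses : List Int) (speeds : List Int), Dom_solution progresses speeds → Pre_solution progresses speeds → Spec_solution progresses speeds (solution progresses speeds)

-- ===== LEMMAS AND PROOFS =====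

-- batch list by structural recursion: the common specification both programs are reduced to
def batchesL : List Int → List Int
  | [] => []
  | d :: t => (1 + ((t.takeWhile (· ≤ d)).length : Int)) :: batchesL (t.dropWhile (· ≤ d))
termination_by l => l.length
decreasing_by
  have := List.length_dropWhile_le (fun x => decide (x ≤ d)) t
  simp_all

theorem batchesL_nil : batchesL [] = [] := by
  rw [batchesL.eq_def]

theorem batchesL_cons (d : Int) (t : List Int) :
    batchesL (d :: t)
      = (1 + ((t.takeWhile (· ≤ d)).length : Int)) :: batchesL (t.dropWhile (· ≤ d)) := by
  rw [batchesL.eq_def]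

--------------------------------------------------------------------------------
-- A-side: the stateful loop computes batchesL
--------------------------------------------------------------------------------

-- value-level reformulation of A's loop state (leader value instead of leader index)
def goV (lead cnt : Int) : List Int → List Int
  | [] => [cnt]
  | d :: t => if d ≤ lead then goV lead (cnt + 1) t else cnt :: goV d 1 t

theorem mem_enumerate {α : Type} (xs : List α) (s : Int) (p : Int × α)
    (hp : p ∈ PySem.List.enumerate xs s) :
    ∃ k : Nat, ∃ hk : k < xs.length, p = (s + k, xs[k]) := by
  induction xs generalizing s with
  | nil => simp [PySem.List.enumerate_nil] at hp
  | cons a t ih =>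
    rw [PySem.List.enumerate_cons] at hp
    rcases List.mem_cons.1 hp with h | h
    · exact ⟨0, by simp, by simp [h]⟩
    · obtain ⟨k, hk, hpk⟩ := ih (s + 1) h
      refine ⟨k + 1, by simp; omega, ?_⟩
      rw [hpk]
      simp [List.getElem_cons_succ]
      omega

theorem foldA_eq (days : List Int) (rest : List (Int × Int)) (ans : List Int)
    (tidx cnt : Int)
    (hlead : ∀ q ∈ rest, q.1 ≠ 0 ∧ PySem.List.pyGetD days q.1 0 = q.2) :
    (rest.foldl (stepA days) (ans, tidx, cnt)).1
        ++ [(rest.foldl (stepA days) (ans, tidx, cnt)).2.2]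
      = ans ++ goV (PySem.List.pyGetD days tidx 0) cnt (rest.map (·.2)) := by
  induction rest generalizing ans tidx cnt with
  | nil => simp [goV]
  | cons q rest ih =>
    obtain ⟨hq0, hqv⟩ := hlead q (List.mem_cons_self)
    have hrest : ∀ q ∈ rest, q.1 ≠ 0 ∧ PySem.List.pyGetD days q.1 0 = q.2 :=
      fun r hr => hlead r (List.mem_cons_of_mem _ hr)
    have hstep : stepA days (ans, tidx, cnt) q =
        if q.2 ≤ PySem.List.pyGetD days tidx 0 then (ans, tidx, cnt + 1)
        else (ans ++ [cnt], q.1, 1) := by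
      simp [stepA, hq0]
    rw [List.foldl_cons, hstep]
    by_cases hle : q.2 ≤ PySem.List.pyGetD days tidx 0
    · rw [if_pos hle]
      simp only [List.map_cons, goV, if_pos hle]
      exact ih ans tidx (cnt + 1) hrest
    · rw [if_neg hle]
      simp only [List.map_cons, goV, if_neg hle]
      rw [ih (ans ++ [cnt]) q.1 1 hrest, hqv]
      simp

theorem goV_eq (vs : List Int) (lead cnt : Int) :
    goV lead cnt vs
      = (cnt + ((vs.takeWhile (· ≤ lead)).length : Int))
          :: batchesL (vs.dropWhile (· ≤ lead)) := by
  induction vs generalizing lead cnt with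
  | nil => simp [goV, batchesL_nil]
  | cons d t ih =>
    by_cases h : d ≤ lead
    · simp only [goV, if_pos h, List.takeWhile, List.dropWhile,
        decide_eq_true h, ih, List.length_cons]
      congr 1
      push_cast; ring
    · simp only [goV, if_neg h, List.takeWhile, List.dropWhile,
        decide_eq_false h, ih, batchesL_cons]
      simp

theorem loopA_eq (days : List Int) (hne : days ≠ []) :
    ((PySem.List.enumerate days 0).foldl (stepA days) ([], 0, 1)).1
        ++ [((PySem.List.enumerate days 0).foldl (stepA days) ([], 0, 1)).2.2]
      = batchesL days := by
  obtain ⟨d, t, hdt⟩ := List.exists_cons_of_ne_nil hne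
  subst hdt
  have hcond : ∀ q ∈ PySem.List.enumerate t (0 + 1), q.1 ≠ 0 ∧
      PySem.List.pyGetD (d :: t) q.1 0 = q.2 := by
    intro q hq
    obtain ⟨k, hk, hqk⟩ := mem_enumerate t (0 + 1) q hq
    subst hqk
    constructor
    · simp; omega
    · have hcast : ((0 : Int) + 1 + (k : Int)) = ((k + 1 : Nat) : Int) := by push_cast; ring
      rw [hcast, PySem.List.pyGetD_natCast]
      simp [hk]
  have hstep0 : stepA (d :: t) (([] : List Int), (0 : Int), (1 : Int)) (0, d) = ([], 0, 1) := by
    simp [stepA]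
  rw [PySem.List.enumerate_cons, List.foldl_cons, hstep0, foldA_eq (d :: t) _ [] 0 1 hcond]
  have hget0 : PySem.List.pyGetD (d :: t) (0 : Int) 0 = d :=
    PySem.List.pyGetD_zero_cons ..
  rw [hget0, PySem.List.map_snd_enumerate, goV_eq, batchesL_cons]
  simp

theorem mkDays_ne_nil (progresses speeds : List Int) (h : progresses ≠ []) :
    mkDays progresses speeds ≠ [] := by
  intro c
  apply h
  have : (mkDays progresses speeds).length = progresses.length := by simp [mkDays]
  rw [c] at this
  simpa using List.length_eq_zero_iff.mp this.symm

theorem solution_eq_batchesL (progresses speeds : List Int)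
    (h : progresses ≠ []) :
    solution progresses speeds = batchesL (mkDays progresses speeds) := by
  have hne := mkDays_ne_nil progresses speeds h
  show ((PySem.List.enumerate (mkDays progresses speeds) 0).foldl
          (stepA (mkDays progresses speeds)) ([], 0, 1)).1
        ++ [((PySem.List.enumerate (mkDays progresses speeds) 0).foldl
          (stepA (mkDays progresses speeds)) ([], 0, 1)).2.2]
      = batchesL (mkDays progresses speeds)
  exact loopA_eq _ hne

--------------------------------------------------------------------------------
-- B-side: running-max pass then run-length pass compute batchesL
--------------------------------------------------------------------------------

-- structural meaning of pass 1
def scanMaxFrom (m : Int) : List Int → List Int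
  | [] => []
  | d :: t => (if d > m then d else m) :: scanMaxFrom (if d > m then d else m) t

def scanMax : List Int → List Int
  | [] => []
  | d :: t => d :: scanMaxFrom d t

theorem foldMax_some (t : List Int) (acc : List Int) (m : Int) :
    (t.foldl stepMax (acc, some m)).1 = acc ++ scanMaxFrom m t := by
  induction t generalizing acc m with
  | nil => simp [scanMaxFrom]
  | cons d t ih =>
    simp only [List.foldl_cons, stepMax, scanMaxFrom]
    rw [ih]
    simp

theorem rmaxPass_eq (days : List Int) :
    (days.foldl stepMax ([], none)).1 = scanMax days := by
  cases days with
  | nil => rfl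
  | cons d t =>
    simp only [List.foldl_cons, stepMax, scanMax]
    rw [foldMax_some]
    simp

-- structural meaning of pass 2 (run-length encoding)
def rle : List Int → List Int
  | [] => []
  | a :: t => (1 + ((t.takeWhile (· == a)).length : Int)) :: rle (t.dropWhile (· == a))
termination_by l => l.length
decreasing_by
  have := List.length_dropWhile_le (fun x => x == a) t
  simp_all

theorem rle_nil : rle [] = [] := by rw [rle.eq_def]

theorem rle_cons (a : Int) (t : List Int) :
    rle (a :: t) = (1 + ((t.takeWhile (· == a)).length : Int)) :: rle (t.dropWhile (· == a)) := by
  rw [rle.eq_def]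

def goR (p c : Int) : List Int → List Int
  | [] => [c]
  | v :: t => if v = p then goR p (c + 1) t else c :: goR v 1 t

theorem foldRle_some (t : List Int) (ans : List Int) (p c : Int) :
    (t.foldl stepRle (ans ++ [c], some p)).1 = ans ++ goR p c t := by
  induction t generalizing ans p c with
  | nil => simp [goR]
  | cons v t ih =>
    by_cases h : v = p
    · have hstep : stepRle (ans ++ [c], some p) v = (ans ++ [c + 1], some p) := by
        simp [stepRle, h]
      rw [List.foldl_cons, hstep, ih]
      simp [goR, h]
    · have hstep : stepRle (ans ++ [c], some p) v = ((ans ++ [c]) ++ [1], some v) := by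
        simp [stepRle, h]
      rw [List.foldl_cons, hstep, ih]
      simp [goR, h]

theorem goR_eq (t : List Int) (p c : Int) :
    goR p c t = (c + ((t.takeWhile (· == p)).length : Int)) :: rle (t.dropWhile (· == p)) := by
  induction t generalizing p c with
  | nil => simp [goR, rle_nil]
  | cons v t ih =>
    by_cases h : v = p
    · simp only [goR, if_pos h, List.takeWhile, List.dropWhile, h, beq_self_eq_true, ih,
        List.length_cons]
      congr 1
      push_cast; ring
    · have hb : (v == p) = false := by simp [h]
      simp only [goR, if_neg h, List.takeWhile, List.dropWhile, hb, ih, rle_cons]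
      simp

theorem rlePass_eq (l : List Int) :
    (l.foldl stepRle ([], none)).1 = rle l := by
  cases l with
  | nil => simp [rle_nil]
  | cons v t =>
    have hstep : stepRle (([] : List Int), (none : Option Int)) v = ([] ++ [1], some v) := by
      simp [stepRle]
    rw [List.foldl_cons, hstep, foldRle_some, goR_eq, rle_cons]
    simp

-- pass 1's output decomposes: a constant block for the current batch, then a fresh scan
theorem scanMaxFrom_eq (d : Int) (t : List Int) :
    scanMaxFrom d t
      = List.replicate (t.takeWhile (· ≤ d)).length d ++ scanMax (t.dropWhile (· ≤ d)) := by
  induction t with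
  | nil => simp [scanMaxFrom, scanMax]
  | cons x r ih =>
    by_cases h : x ≤ d
    · have hng : ¬ x > d := by omega
      simp only [scanMaxFrom, if_neg hng, List.takeWhile, List.dropWhile, decide_eq_true h,
        List.length_cons, List.replicate_succ, List.cons_append, ih]
    · have hg : x > d := by omega
      simp only [scanMaxFrom, if_pos hg, List.takeWhile, List.dropWhile, decide_eq_false h,
        List.length_nil, List.replicate_zero, List.nil_append, scanMax]

theorem takeWhile_replicate_append (a : Int) (k : Nat) (l : List Int)
    (h : ∀ x, l.head? = some x → x ≠ a) :
    (List.replicate k a ++ l).takeWhile (· == a) = List.replicate k a ∧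
    (List.replicate k a ++ l).dropWhile (· == a) = l := by
  induction k with
  | zero =>
    cases l with
    | nil => simp
    | cons x r =>
      have := h x rfl
      simp [List.takeWhile, List.dropWhile, this]
  | succ k ih =>
    simp [List.replicate_succ, List.takeWhile, List.dropWhile, ih]

theorem head?_scanMax (l : List Int) : (scanMax l).head? = l.head? := by
  cases l <;> simp [scanMax]

theorem head?_dropWhile_false {α : Type} (p : α → Bool) (l : List α) (x : α)
    (h : (l.dropWhile p).head? = some x) : p x = false := by
  induction l with
  | nil => simp [List.dropWhile] at h
  | cons a t ih =>
    by_cases hp : p a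
    · rw [List.dropWhile_cons_of_pos hp] at h
      exact ih h
    · rw [List.dropWhile_cons_of_neg hp] at h
      simp at h
      subst h
      simpa using hp

theorem rle_scanMax_aux : ∀ (n : Nat) (t : List Int), t.length ≤ n →
    rle (scanMax t) = batchesL t := by
  intro n
  induction n with
  | zero =>
    intro t ht
    have : t = [] := List.length_eq_zero_iff.mp (by omega)
    subst this
    simp [scanMax, rle_nil, batchesL_nil]
  | succ n ih =>
    intro t ht
    cases t with
    | nil => simp [scanMax, rle_nil, batchesL_nil]
    | cons d t =>
      have hhead : ∀ x, (scanMax (t.dropWhile (· ≤ d))).head? = some x → x ≠ d := by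
        intro x hx
        rw [head?_scanMax] at hx
        have hfalse := head?_dropWhile_false (fun y => decide (y ≤ d)) t x hx
        intro hxd
        subst hxd
        simp at hfalse
      obtain ⟨htake, hdrop⟩ :=
        takeWhile_replicate_append d (t.takeWhile (· ≤ d)).length
          (scanMax (t.dropWhile (· ≤ d))) hhead
      have hlen : (t.dropWhile (· ≤ d)).length ≤ n := by
        have := List.length_dropWhile_le (fun x => decide (x ≤ d)) t
        simp only [List.length_cons] at ht
        omega
      calc rle (scanMax (d :: t))
          = rle (d :: (List.replicate (t.takeWhile (· ≤ d)).length d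
              ++ scanMax (t.dropWhile (· ≤ d)))) := by
            rw [scanMax, scanMaxFrom_eq]
        _ = batchesL (d :: t) := by
            rw [rle_cons, htake, hdrop, List.length_replicate, batchesL_cons,
              ih _ hlen]

-- main claim proofs below use solution_alt_eq_batchesL
theorem solution_alt_eq_batchesL (progresses speeds : List Int) :
    solution_alt progresses speeds = batchesL (mkDays progresses speeds) := by
  show ((((mkDays progresses speeds).foldl stepMax ([], none)).1).foldl stepRle ([], none)).1
      = batchesL (mkDays progresses speeds)
  rw [rmaxPass_eq, rlePass_eq]
  exact rle_scanMax_aux (mkDays progresses speeds).length _ le_rfl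

-- ===== VERDICT (by name: the statement is the Claim_ definition above) =====
theorem solution_spec : Claim_equal_solution := by
  intro progresses speeds _hdom hpre
  have h : progresses ≠ [] := hpre.1
  show solution progresses speeds = solution_alt progresses speeds
  rw [solution_eq_batchesL progresses speeds h, solution_alt_eq_batchesL]
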